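-- pv_equiv track=rewrite | github.com/okeke-2011/Connect-4-AI | Connect-4 AI.py | retrieve_diagonal
-- ===== SOURCE A (Python) =====
-- def retrieve_diagonal(ind):
--     lst = []
--     if ind < 12:
--         for i in range(7):
--             for j in range(6):
--                 if i+j == ind:
--                     lst.append([j,i])
--     elif ind >= 12:
--         ind = ind - 12
--         for i in range(7):
--             for j in range(6):
--                 if (j-i)%12 == ind:
--                     lst.append([j,i])
--     return lst
-- ===== SOURCE B (Python) =====
-- def retrieve_diagonal(ind):
--     # Each diagonal cell's column is computed directly from the row: one pass, no inner scan.
--     if ind < 12: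
--         return [[ind - i, i] for i in range(7) if 0 <= ind - i < 6]
--     t = ind - 12
--     if t > 11:
--         return []
--     d = t if t <= 5 else t - 12
--     return [[i + d, i] for i in range(7) if 0 <= i + d < 6]
-- ===== Notes on version B (the rewrite author's own statement) =====
-- stated objective: simpler
-- what changed: Replaced A's nested row-by-column scan of every board cell with a single pass over the rows that computes the unique matching column directly (ind minus the row, or the row plus the in-range modular representative).
import Mathlib
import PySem

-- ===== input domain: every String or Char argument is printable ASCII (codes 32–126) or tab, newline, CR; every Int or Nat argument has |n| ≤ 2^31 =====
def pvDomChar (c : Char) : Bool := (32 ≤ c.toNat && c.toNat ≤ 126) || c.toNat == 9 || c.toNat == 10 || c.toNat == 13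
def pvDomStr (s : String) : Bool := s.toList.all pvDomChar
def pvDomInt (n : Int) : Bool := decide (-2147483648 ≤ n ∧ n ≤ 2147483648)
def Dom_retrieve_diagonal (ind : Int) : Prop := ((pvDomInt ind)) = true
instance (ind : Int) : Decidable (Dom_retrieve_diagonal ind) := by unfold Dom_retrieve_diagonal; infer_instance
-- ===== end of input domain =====

-- B replaces A's nested scan of every board cell with a single pass over the rows,
-- computing the unique matching column directly (objective: simpler).

-- ===== PORT A =====
-- literal transliteration of A: nested loops over range(7) × range(6), appending
-- [j,i] when the diagonal condition holds; the reassignment `ind = ind - 12` is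
-- inlined as `ind - 12` in the second branch's condition.
def retrieve_diagonal (ind : Int) : List (List Int) :=
  if ind < 12 then
    (PySem.List.pyRange 0 7 1).foldl (fun lst i =>
      (PySem.List.pyRange 0 6 1).foldl (fun lst j =>
        if i + j = ind then lst ++ [[j, i]] else lst) lst) []
  else
    (PySem.List.pyRange 0 7 1).foldl (fun lst i =>
      (PySem.List.pyRange 0 6 1).foldl (fun lst j =>
        if PySem.Int.mod (j - i) 12 = ind - 12 then lst ++ [[j, i]] else lst) lst) []

-- ===== PORT B =====
-- literal transliteration of Source B: one comprehension over range(7) per branch.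
def retrieve_diagonal_alt (ind : Int) : List (List Int) :=
  if ind < 12 then
    ((PySem.List.pyRange 0 7 1).filter (fun i => decide (0 ≤ ind - i ∧ ind - i < 6))).map
      (fun i => [ind - i, i])
  else
    let t := ind - 12
    if t > 11 then []
    else
      let d := if t ≤ 5 then t else t - 12
      ((PySem.List.pyRange 0 7 1).filter (fun i => decide (0 ≤ i + d ∧ i + d < 6))).map
        (fun i => [i + d, i])

-- ===== PRECONDITION & SPEC =====
def Spec_retrieve_diagonal (ind : Int) (out : List (List Int)) : Prop := out = retrieve_diagonal_alt ind
instance (ind : Int) (out : List (List Int)) : Decidable (Spec_retrieve_diagonal ind out) := by unfold Spec_retrieve_diagonal; infer_instance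

-- ===== CLAIM (what is proved, stated in full; the proofs are below) =====
def Claim_equal_retrieve_diagonal : Prop := ∀ (ind : Int), Dom_retrieve_diagonal ind → Spec_retrieve_diagonal ind (retrieve_diagonal ind)

-- ===== LEMMAS AND PROOFS =====

-- a foldl whose step never changes the accumulator returns its initial value
theorem pv_foldl_fixed {α β : Type} (l : List α) (f : β → α → β) (acc : β)
    (h : ∀ a x, x ∈ l → f a x = a) : l.foldl f acc = acc := by
  induction l generalizing acc with
  | nil => rfl
  | cons y ys ih =>
    rw [List.foldl_cons, h acc y (by simp)]
    exact ih acc (fun a x hx => h a x (List.mem_cons_of_mem _ hx))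

-- ===== VERDICT (by name: the statement is the Claim_ definition above) =====
theorem retrieve_diagonal_spec : Claim_equal_retrieve_diagonal := by
  intro ind _
  unfold Spec_retrieve_diagonal
  rcases lt_or_ge ind 0 with h | h
  · -- both branches are empty: no cell satisfies the condition
    have hA : retrieve_diagonal ind = [] := by
      unfold retrieve_diagonal
      rw [if_pos (show ind < 12 by omega)]
      apply pv_foldl_fixed
      intro a i hi
      apply pv_foldl_fixed
      intro b j hj
      rw [PySem.List.mem_pyRange_one] at hi hj
      rw [if_neg (by omega)]
    have hB : retrieve_diagonal_alt ind = [] := by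
      unfold retrieve_diagonal_alt
      rw [if_pos (show ind < 12 by omega)]
      rw [List.filter_eq_nil_iff.mpr (fun i hi => by
        rw [PySem.List.mem_pyRange_one] at hi
        simp only [decide_eq_true_eq]
        omega)]
      rfl
    rw [hA, hB]
  rcases lt_or_ge ind 12 with h2 | h2
  · interval_cases ind <;> decide
  rcases lt_or_ge ind 24 with h3 | h3
  · interval_cases ind <;> decide
  · -- too large: (j-i)%12 < 12 ≤ ind-12, and B's guard returns []
    have hA : retrieve_diagonal ind = [] := by
      unfold retrieve_diagonal
      rw [if_neg (show ¬ ind < 12 by omega)]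
      apply pv_foldl_fixed
      intro a i hi
      apply pv_foldl_fixed
      intro b j hj
      have hm := PySem.Int.mod_lt (j - i) (show (0:Int) < 12 by norm_num)
      rw [if_neg (by omega)]
    have hB : retrieve_diagonal_alt ind = [] := by
      unfold retrieve_diagonal_alt
      rw [if_neg (show ¬ ind < 12 by omega)]
      simp only []
      rw [if_pos (show ind - 12 > 11 by omega)]
    rw [hA, hB]
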